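-- pv_equiv track=rewrite | github.com/Grupo15DALGO/TallerClase | Ejercicio1.py | bfs
-- ===== SOURCE A (Python) =====
-- def bfs(grafo, inicio, nodos_a_visitar):
--     visitados = set()
--     cola = [inicio]
--     visitados.add(inicio)
--     while cola:
--         nodo = cola.pop(0)
--         for arista in grafo:
--             u, v, _ = arista
--             if u == nodo:
--                 vecino = v
--             elif v == nodo:
--                 vecino = u
--             else:
--                 continue
--             if vecino not in visitados:
--                 cola.append(vecino)
--                 visitados.add(vecino)
--     nodos_no_visitados = [nodo for nodo in nodos_a_visitar if nodo not in visitados]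
--     return nodos_no_visitados
-- ===== SOURCE B (Python) =====
-- def bfs(grafo, inicio, nodos_a_visitar):
--     # Build adjacency lists once, then BFS over them with a cursor queue.
--     adj = {}
--     for u, v, _ in grafo:
--         adj.setdefault(u, []).append(v)
--         adj.setdefault(v, []).append(u)
--     visitados = {inicio}
--     cola = [inicio]
--     i = 0
--     while i < len(cola):
--         nodo = cola[i]
--         i += 1
--         for vecino in adj.get(nodo, []):
--             if vecino not in visitados:
--                 visitados.add(vecino)
--                 cola.append(vecino)
--     return [n for n in nodos_a_visitar if n not in visitados]
-- ===== Notes on version B (the rewrite author's own statement) =====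
-- stated objective: alternative
-- what changed: B precomputes adjacency lists in a dict and runs BFS over them with a cursor queue, instead of rescanning the whole edge list for every dequeued node and popping from the front of a list.
import Mathlib
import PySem

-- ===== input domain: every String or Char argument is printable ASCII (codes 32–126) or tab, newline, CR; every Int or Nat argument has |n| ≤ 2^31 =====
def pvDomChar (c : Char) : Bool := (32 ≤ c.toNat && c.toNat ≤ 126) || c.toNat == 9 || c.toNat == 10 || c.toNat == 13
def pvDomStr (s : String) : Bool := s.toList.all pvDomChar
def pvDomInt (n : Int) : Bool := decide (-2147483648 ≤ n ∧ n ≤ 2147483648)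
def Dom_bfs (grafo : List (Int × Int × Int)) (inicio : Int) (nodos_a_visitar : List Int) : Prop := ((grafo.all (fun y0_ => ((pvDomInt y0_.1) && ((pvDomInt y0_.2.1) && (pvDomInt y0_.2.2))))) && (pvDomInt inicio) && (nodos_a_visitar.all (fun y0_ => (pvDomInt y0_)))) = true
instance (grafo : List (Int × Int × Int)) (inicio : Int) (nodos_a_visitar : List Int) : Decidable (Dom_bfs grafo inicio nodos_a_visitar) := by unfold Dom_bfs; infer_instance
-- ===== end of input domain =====

-- B replaces A's per-node rescan of the whole edge list by a precomputed adjacency dict and a cursor queue (alternative algorithm, same return value).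


-- measure helpers (used by both ports' termination proofs; cited by name in decreasing_by)
def pvNodes (grafo : List (Int × Int × Int)) : List Int := grafo.flatMap (fun e => [e.1, e.2.1])

def pvUnvis (N : List Int) (vis : PySem.Set Int) : Nat :=
  ((PySem.Set.ofList N).filter (fun n => !(PySem.Set.contains vis n))).length

theorem pvUnvis_add_of_not_mem (N : List Int) (vis : PySem.Set Int) (w : Int)
    (hN : w ∈ N) (hv : ¬ w ∈ vis) :
    pvUnvis N (PySem.Set.add vis w) + 1 = pvUnvis N vis := by
  unfold pvUnvis
  have hfe : (PySem.Set.ofList N).filter (fun n => !(PySem.Set.contains (PySem.Set.add vis w) n))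
      = ((PySem.Set.ofList N).filter (fun n => !(PySem.Set.contains vis n))).filter (fun n => n ≠ w) := by
    rw [List.filter_filter]
    apply List.filter_congr
    intro n _
    by_cases h1 : n ∈ vis <;> by_cases h2 : n = w <;>
      simp [PySem.Set.mem_add, h1, h2]
  rw [hfe]
  have hnd : ((PySem.Set.ofList N).filter (fun n => !(PySem.Set.contains vis n))).Nodup :=
    (PySem.Set.nodup_ofList N).filter _
  have hmem : w ∈ (PySem.Set.ofList N).filter (fun n => !(PySem.Set.contains vis n)) := by
    rw [List.mem_filter]
    exact ⟨(PySem.Set.mem_ofList N w).2 hN, by simp [hv]⟩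
  have he : ((PySem.Set.ofList N).filter (fun n => !(PySem.Set.contains vis n))).filter (fun n => n ≠ w)
      = ((PySem.Set.ofList N).filter (fun n => !(PySem.Set.contains vis n))).erase w := by
    rw [List.Nodup.erase_eq_filter hnd]
    apply List.filter_congr; intro n _; by_cases hnw : n = w <;> simp [hnw, bne]
  rw [he, List.length_erase_of_mem hmem]
  have : 0 < ((PySem.Set.ofList N).filter (fun n => !(PySem.Set.contains vis n))).length :=
    List.length_pos_of_mem hmem
  omega

-- ===== PORT A =====
-- the body of A's inner 'for arista in grafo' loop, acting on the state (visitados, cola)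
def bfsVisit (nodo : Int) (st : PySem.Set Int × List Int) (e : Int × Int × Int) :
    PySem.Set Int × List Int :=
  if e.1 = nodo then
    (if PySem.Set.contains st.1 e.2.1 then st else (PySem.Set.add st.1 e.2.1, st.2 ++ [e.2.1]))
  else if e.2.1 = nodo then
    (if PySem.Set.contains st.1 e.1 then st else (PySem.Set.add st.1 e.1, st.2 ++ [e.1]))
  else st

theorem bfsVisit_measure (N : List Int) (nodo : Int) :
    ∀ (l : List (Int × Int × Int)) (st : PySem.Set Int × List Int),
    (∀ e ∈ l, e.1 ∈ N ∧ e.2.1 ∈ N) →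
    pvUnvis N (l.foldl (bfsVisit nodo) st).1 + (l.foldl (bfsVisit nodo) st).2.length
      ≤ pvUnvis N st.1 + st.2.length := by
  intro l
  induction l with
  | nil => intro st _; simp
  | cons e l ih =>
    intro st h
    have hstep : pvUnvis N (bfsVisit nodo st e).1 + (bfsVisit nodo st e).2.length
        ≤ pvUnvis N st.1 + st.2.length := by
      have he := h e (by simp)
      unfold bfsVisit
      split_ifs with h1 h2 h3 h4 <;> simp
      · have := pvUnvis_add_of_not_mem N st.1 e.2.1 he.2
          (by simpa [PySem.Set.contains_iff] using h2)
        omega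
      · have := pvUnvis_add_of_not_mem N st.1 e.1 he.1
          (by simpa [PySem.Set.contains_iff] using h4)
        omega
    calc pvUnvis N ((e :: l).foldl (bfsVisit nodo) st).1 + ((e :: l).foldl (bfsVisit nodo) st).2.length
        ≤ pvUnvis N (bfsVisit nodo st e).1 + (bfsVisit nodo st e).2.length := by
          simpa using ih (bfsVisit nodo st e) (fun e' he' => h e' (by simp [he']))
      _ ≤ _ := hstep

-- A's 'while cola' loop, returning the final visitados set
def bfsLoop (grafo : List (Int × Int × Int)) (vis : PySem.Set Int) (cola : List Int) :
    PySem.Set Int :=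
  match cola with
  | [] => vis
  | nodo :: rest =>
    bfsLoop grafo (grafo.foldl (bfsVisit nodo) (vis, rest)).1
      (grafo.foldl (bfsVisit nodo) (vis, rest)).2
termination_by pvUnvis (pvNodes grafo) vis + cola.length
decreasing_by
  have h := bfsVisit_measure (pvNodes grafo) nodo grafo (vis, rest) (by
    intro e he
    constructor <;> exact List.mem_flatMap.2 ⟨e, he, by simp⟩)
  simp only [List.length_cons, List.foldl_attach] at *
  omega

def bfs (grafo : List (Int × Int × Int)) (inicio : Int) (nodos_a_visitar : List Int) : List Int :=
  -- visitados = {inicio}; cola = [inicio]; run the loop; keep the nodes not visited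
  nodos_a_visitar.filter (fun nodo =>
    !(PySem.Set.contains (bfsLoop grafo (PySem.Set.add PySem.Set.empty inicio) [inicio]) nodo))

-- ===== PORT B =====
-- adjacency dict: for (u, v, _) in grafo: adj.setdefault(u, []).append(v); adj.setdefault(v, []).append(u)
def buildAdj (grafo : List (Int × Int × Int)) : PySem.Dict Int (List Int) :=
  grafo.foldl (fun d e => (d.modify e.1 [] (· ++ [e.2.1])).modify e.2.1 [] (· ++ [e.1]))
    PySem.Dict.empty

-- body of B's 'for vecino in adj.get(nodo, [])' loop
def bfsStep (st : PySem.Set Int × List Int) (w : Int) : PySem.Set Int × List Int :=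
  if PySem.Set.contains st.1 w then st else (PySem.Set.add st.1 w, st.2 ++ [w])

theorem bfsStep_measure (N : List Int) :
    ∀ (l : List Int) (st : PySem.Set Int × List Int),
    (∀ w ∈ l, w ∈ N) →
    pvUnvis N (l.foldl bfsStep st).1 + (l.foldl bfsStep st).2.length
      ≤ pvUnvis N st.1 + st.2.length := by
  intro l
  induction l with
  | nil => intro st _; simp
  | cons w l ih =>
    intro st h
    have hstep : pvUnvis N (bfsStep st w).1 + (bfsStep st w).2.length
        ≤ pvUnvis N st.1 + st.2.length := by
      unfold bfsStep
      split_ifs with h1 <;> simp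
      have := pvUnvis_add_of_not_mem N st.1 w (h w (by simp))
        (by simpa [PySem.Set.contains_iff] using h1)
      omega
    calc pvUnvis N ((w :: l).foldl bfsStep st).1 + ((w :: l).foldl bfsStep st).2.length
        ≤ pvUnvis N (bfsStep st w).1 + (bfsStep st w).2.length := by
          simpa using ih (bfsStep st w) (fun w' hw' => h w' (by simp [hw']))
      _ ≤ _ := hstep

theorem mem_getD_values {d : PySem.Dict Int (List Int)} {k w : Int}
    (h : w ∈ d.getD k []) : w ∈ d.values.flatten := by
  rw [PySem.Dict.getD_eq_get?_getD] at h
  cases hg : d.get? k with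
  | none => rw [hg] at h; simp at h
  | some v =>
    rw [hg] at h
    have hi := PySem.Dict.mem_items_of_get?_eq_some d hg
    exact List.mem_flatten.2 ⟨v, List.mem_map.2 ⟨(k, v), hi, rfl⟩, by simpa using h⟩

-- B's BFS loop over the cursor view of the queue (cola[i:]): popping the cursor head,
-- pushing the unvisited neighbours from the adjacency dict
def bfsLoopAlt (adj : PySem.Dict Int (List Int)) (vis : PySem.Set Int) (cola : List Int) :
    PySem.Set Int :=
  match cola with
  | [] => vis
  | nodo :: rest =>
    bfsLoopAlt adj ((adj.getD nodo []).foldl bfsStep (vis, rest)).1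
      ((adj.getD nodo []).foldl bfsStep (vis, rest)).2
termination_by pvUnvis adj.values.flatten vis + cola.length
decreasing_by
  have h := bfsStep_measure adj.values.flatten (adj.getD nodo []) (vis, rest)
    (fun w hw => mem_getD_values hw)
  simp only [List.length_cons] at *
  omega

def bfs_alt (grafo : List (Int × Int × Int)) (inicio : Int) (nodos_a_visitar : List Int) :
    List Int :=
  nodos_a_visitar.filter (fun n =>
    !(PySem.Set.contains (bfsLoopAlt (buildAdj grafo) (PySem.Set.add PySem.Set.empty inicio) [inicio]) n))

-- ===== PRECONDITION & SPEC =====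
def Spec_bfs (grafo : List (Int × Int × Int)) (inicio : Int) (nodos_a_visitar : List Int) (out : List Int) : Prop := out = bfs_alt grafo inicio nodos_a_visitar
instance (grafo : List (Int × Int × Int)) (inicio : Int) (nodos_a_visitar : List Int) (out : List Int) : Decidable (Spec_bfs grafo inicio nodos_a_visitar out) := by unfold Spec_bfs; infer_instance

-- ===== CLAIM (what is proved, stated in full; the proofs are below) =====
def Claim_equal_bfs : Prop := ∀ (grafo : List (Int × Int × Int)) (inicio : Int) (nodos_a_visitar : List Int), Dom_bfs grafo inicio nodos_a_visitar → Spec_bfs grafo inicio nodos_a_visitar (bfs grafo inicio nodos_a_visitar)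

-- ===== LEMMAS AND PROOFS =====

-- the neighbours an edge e contributes for the current node, in B's adjacency order
def pvContrib (nodo : Int) (e : Int × Int × Int) : List Int :=
  (if e.1 = nodo then [e.2.1] else []) ++ (if e.2.1 = nodo then [e.1] else [])

theorem getD_foldlAdj (l : List (Int × Int × Int)) :
    ∀ (d : PySem.Dict Int (List Int)) (k : Int),
    (l.foldl (fun d e => (d.modify e.1 [] (· ++ [e.2.1])).modify e.2.1 [] (· ++ [e.1])) d).getD k []
      = d.getD k [] ++ l.flatMap (pvContrib k) := by
  induction l with
  | nil => intro d k; simp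
  | cons e l ih =>
    intro d k
    rw [List.foldl_cons, ih]
    by_cases h1 : k = e.1 <;> by_cases h2 : k = e.2.1
    · subst h1
      simp [pvContrib, ← h2, List.append_assoc]
    · subst h1
      simp [PySem.Dict.getD_modify, pvContrib, h2,
        show ¬ e.2.1 = e.1 from fun hh => h2 hh.symm, List.append_assoc]
    · subst h2
      simp [PySem.Dict.getD_modify, pvContrib, h1,
        show ¬ e.1 = e.2.1 from fun hh => h1 hh.symm, List.append_assoc]
    · simp [PySem.Dict.getD_modify, pvContrib, h1, h2,
        show ¬ e.1 = k from fun hh => h1 hh.symm,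
        show ¬ e.2.1 = k from fun hh => h2 hh.symm]

theorem getD_buildAdj (grafo : List (Int × Int × Int)) (k : Int) :
    (buildAdj grafo).getD k [] = grafo.flatMap (pvContrib k) := by
  unfold buildAdj
  rw [getD_foldlAdj]
  simp

theorem mem_fst_foldl_bfsStep (l : List Int) (st : PySem.Set Int × List Int) (x : Int)
    (hx : x ∈ st.1) : x ∈ (l.foldl bfsStep st).1 := by
  induction l generalizing st with
  | nil => simpa
  | cons w l ih =>
    apply ih
    unfold bfsStep
    split_ifs <;> simp [PySem.Set.mem_add, hx]

theorem inv_foldl_bfsStep (l : List Int) (st : PySem.Set Int × List Int)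
    (h : ∀ x ∈ st.2, x ∈ st.1) : ∀ x ∈ (l.foldl bfsStep st).2, x ∈ (l.foldl bfsStep st).1 := by
  induction l generalizing st with
  | nil => simpa
  | cons w l ih =>
    apply ih
    unfold bfsStep
    split_ifs with h1
    · exact h
    · intro x hx
      simp only [List.mem_append, List.mem_singleton] at hx
      rcases hx with hx | hx
      · simp [PySem.Set.mem_add]; exact Or.inl (h x hx)
      · simp [PySem.Set.mem_add, hx]

theorem visit_eq_contrib (nodo : Int) (st : PySem.Set Int × List Int)
    (e : Int × Int × Int) (h : nodo ∈ st.1) :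
    bfsVisit nodo st e = (pvContrib nodo e).foldl bfsStep st := by
  have hc : ∀ w : Int, w = nodo → PySem.Set.contains st.1 w = true := by
    intro w hw; rw [hw]; exact (PySem.Set.contains_iff st.1 nodo).2 h
  unfold bfsVisit pvContrib bfsStep
  by_cases h1 : e.1 = nodo <;> by_cases h2 : e.2.1 = nodo <;> simp [h1, h2, h]

theorem inner_eq (nodo : Int) (l : List (Int × Int × Int)) (st : PySem.Set Int × List Int)
    (h : nodo ∈ st.1) :
    l.foldl (bfsVisit nodo) st = (l.flatMap (pvContrib nodo)).foldl bfsStep st := by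
  induction l generalizing st with
  | nil => simp
  | cons e l ih =>
    rw [List.foldl_cons, visit_eq_contrib nodo st e h, List.flatMap_cons, List.foldl_append]
    exact ih _ (mem_fst_foldl_bfsStep _ _ _ h)

theorem loop_eq (grafo : List (Int × Int × Int)) (vis : PySem.Set Int) (cola : List Int)
    (h : ∀ x ∈ cola, x ∈ vis) :
    bfsLoop grafo vis cola = bfsLoopAlt (buildAdj grafo) vis cola := by
  have main : ∀ (n : Nat) (vis : PySem.Set Int) (cola : List Int),
      pvUnvis (pvNodes grafo) vis + cola.length ≤ n → (∀ x ∈ cola, x ∈ vis) →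
      bfsLoop grafo vis cola = bfsLoopAlt (buildAdj grafo) vis cola := by
    intro n
    induction n with
    | zero =>
      intro vis cola hn _
      have : cola = [] := by cases cola <;> simp_all
      subst this
      rw [bfsLoop, bfsLoopAlt]
    | succ n ih =>
      intro vis cola hn h
      match cola with
      | [] => rw [bfsLoop, bfsLoopAlt]
      | nodo :: rest =>
        rw [bfsLoop, bfsLoopAlt]
        have hst : grafo.foldl (bfsVisit nodo) (vis, rest)
            = ((buildAdj grafo).getD nodo []).foldl bfsStep (vis, rest) := by
          rw [getD_buildAdj, ← inner_eq nodo grafo (vis, rest) (h nodo (by simp))]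
        rw [hst]
        apply ih
        · have hm := bfsStep_measure (pvNodes grafo) ((buildAdj grafo).getD nodo []) (vis, rest)
            (by
              intro w hw
              rw [getD_buildAdj] at hw
              rcases List.mem_flatMap.1 hw with ⟨e, he, hc⟩
              unfold pvContrib at hc
              rcases List.mem_append.1 hc with hc | hc <;>
                [ (exact List.mem_flatMap.2 ⟨e, he, by
                    by_cases h1 : e.1 = nodo <;> simp_all⟩);
                  (exact List.mem_flatMap.2 ⟨e, he, by
                    by_cases h2 : e.2.1 = nodo <;> simp_all⟩) ])
          simp only [List.length_cons] at hn
          simp only [] at hm ⊢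
          omega
        · exact inv_foldl_bfsStep _ _ (fun x hx => h x (by simp [hx]))
  exact main (pvUnvis (pvNodes grafo) vis + cola.length) vis cola (le_refl _) h

-- ===== VERDICT (by name: the statement is the Claim_ definition above) =====
theorem bfs_spec : Claim_equal_bfs := by
  intro grafo inicio nodos _
  unfold Spec_bfs bfs bfs_alt
  rw [loop_eq grafo _ [inicio] (by simp)]
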